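-- pv_equiv track=rewrite | github.com/yuliiabuchko/Advent-of-Code-2021 | day03/part2.py | count_pos_bits
-- ===== SOURCE A (Python) =====
-- def count_pos_bits(bits: list[str], index: int) -> int:
--     pos_count = 0
--     for line in bits:
--         if line[index] == '1':
--             pos_count += 1
--         elif line[index] == '0':
--             pos_count -= 1
--     return pos_count
-- ===== SOURCE B (Python) =====
-- def count_pos_bits(bits: list[str], index: int) -> int:
--     # Divide and conquer over the index range [lo, hi): a singleton range
--     # contributes +1 for '1', -1 for '0', 0 otherwise; larger ranges are split
--     # at the midpoint and the two halves' signed counts are added.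
--     def go(lo: int, hi: int) -> int:
--         if hi - lo == 0:
--             return 0
--         if hi - lo == 1:
--             c = bits[lo][index]
--             if c == '1':
--                 return 1
--             if c == '0':
--                 return -1
--             return 0
--         mid = (lo + hi) // 2
--         return go(lo, mid) + go(mid, hi)
--     return go(0, len(bits))
-- ===== Notes on version B (the rewrite author's own statement) =====
-- stated objective: alternative
-- what changed: Replaces A's single linear accumulator loop with a divide-and-conquer recursion that splits the index range at the midpoint and adds the signed counts of the two halves (correct because the per-line contribution is additive over any partition of the lines).
import Mathlib
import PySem

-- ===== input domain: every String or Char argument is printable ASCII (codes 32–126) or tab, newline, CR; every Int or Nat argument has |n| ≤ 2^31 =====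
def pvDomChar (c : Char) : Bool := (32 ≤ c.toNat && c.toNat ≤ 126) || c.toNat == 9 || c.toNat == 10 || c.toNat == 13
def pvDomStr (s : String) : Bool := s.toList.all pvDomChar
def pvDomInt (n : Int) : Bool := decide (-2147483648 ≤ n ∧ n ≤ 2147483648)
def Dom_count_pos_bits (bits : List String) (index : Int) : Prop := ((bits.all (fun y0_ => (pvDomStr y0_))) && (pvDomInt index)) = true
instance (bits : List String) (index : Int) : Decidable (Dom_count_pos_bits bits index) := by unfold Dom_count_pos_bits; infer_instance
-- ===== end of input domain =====

-- B replaces A's linear accumulator loop with a divide-and-conquer recursion over index ranges (objective: alternative).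

-- ===== PORT A =====
-- running accumulator over the lines; line[index] via pyGet? (none = IndexError, excluded by Pre_)
def count_pos_bits (bits : List String) (index : Int) : Int :=
  bits.foldl (fun pos_count line =>
    match PySem.Str.pyGet? line index with
    | some '1' => pos_count + 1
    | some '0' => pos_count - 1
    | _ => pos_count) 0

-- ===== PORT B =====
-- go lo hi: signed count over bits[lo:hi], split at the midpoint.
-- bits[lo] via pyGet? (always some here since 0 ≤ lo < len on every reachable call);
-- line[index] via pyGet? (none = IndexError, excluded by Pre_, counted as 0 to stay total)
def pvGoB (bits : List String) (index : Int) (lo hi : Nat) : Int :=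
  if _h0 : hi - lo = 0 then 0
  else if _h1 : hi - lo = 1 then
    match PySem.List.pyGet? bits (lo : Int) with
    | some line =>
      match PySem.Str.pyGet? line index with
      | some c => if c = '1' then 1 else if c = '0' then -1 else 0
      | none => 0
    | none => 0
  else
    pvGoB bits index lo ((lo + hi) / 2) +
    pvGoB bits index ((lo + hi) / 2) hi
termination_by hi - lo
decreasing_by all_goals omega

def count_pos_bits_alt (bits : List String) (index : Int) : Int :=
  pvGoB bits index 0 bits.length

-- ===== PRECONDITION & SPEC =====
-- Pre_ excludes exactly the inputs where some line[index] raises IndexError in Python.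
def Pre_count_pos_bits (bits : List String) (index : Int) : Prop :=
  ∀ line ∈ bits, PySem.Raise.InRange line.length index
instance (bits : List String) (index : Int) : Decidable (Pre_count_pos_bits bits index) := by unfold Pre_count_pos_bits; infer_instance
def pvWitness_count_pos_bits : List String × Int := (["101", "010", "1x1"], 1)

def Spec_count_pos_bits (bits : List String) (index : Int) (out : Int) : Prop := out = count_pos_bits_alt bits index
instance (bits : List String) (index : Int) (out : Int) : Decidable (Spec_count_pos_bits bits index out) := by unfold Spec_count_pos_bits; infer_instance

-- ===== CLAIM (what is proved, stated in full; the proofs are below) =====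
def Claim_equal_count_pos_bits : Prop := ∀ (bits : List String) (index : Int), Dom_count_pos_bits bits index → Pre_count_pos_bits bits index → Spec_count_pos_bits bits index (count_pos_bits bits index)

-- ===== LEMMAS AND PROOFS =====
-- per-line signed contribution, common to both proofs
def pvCval (index : Int) (line : String) : Int :=
  match PySem.Str.pyGet? line index with
  | some '1' => 1
  | some '0' => -1
  | _ => 0

lemma count_pos_bits_foldl (bits : List String) (index : Int) (acc : Int) :
    bits.foldl (fun pos_count line =>
      match PySem.Str.pyGet? line index with
      | some '1' => pos_count + 1
      | some '0' => pos_count - 1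
      | _ => pos_count) acc
    = acc + (bits.map (pvCval index)).sum := by
  induction bits generalizing acc with
  | nil => simp
  | cons l ls ih =>
    simp only [List.foldl_cons, ih, List.map_cons, List.sum_cons, pvCval]
    rcases PySem.Str.pyGet? l index with _ | c
    · ring
    · by_cases h1 : c = '1'
      · subst h1; simp; ring
      · by_cases h0 : c = '0'
        · subst h0; simp; ring
        · split <;> simp_all

lemma pvGoB_sum (bits : List String) (index : Int) :
    ∀ (n lo : Nat), lo + n ≤ bits.length →
      pvGoB bits index lo (lo + n)
        = (((bits.drop lo).take n).map (pvCval index)).sum := by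
  intro n
  induction n using Nat.strong_induction_on with
  | _ n ih =>
    intro lo hle
    rcases Nat.eq_or_lt_of_le (Nat.zero_le n) with h0 | hpos
    · rw [pvGoB]; simp [← h0]
    rcases Nat.eq_or_lt_of_le hpos with h1 | h2
    · -- n = 1
      rw [pvGoB]
      have hlt : lo < bits.length := by omega
      simp only [← h1]
      rw [PySem.List.pyGet?_natCast]
      have : bits[lo]? = some bits[lo] := List.getElem?_eq_getElem hlt
      rw [this]
      have htake : (bits.drop lo).take 1 = [bits[lo]] := by
        rw [List.take_one]
        simp [List.head?_drop, List.getElem?_eq_getElem hlt]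
      simp only [htake, List.map_cons, List.map_nil, List.sum_cons, List.sum_nil, pvCval]
      rw [dif_neg (by omega), dif_pos (by omega)]
      rcases PySem.Str.pyGet? bits[lo] index with _ | c
      · simp
      · by_cases h1 : c = '1'
        · simp [h1]
        · by_cases h0 : c = '0' <;> simp [h1, h0]
    · -- n ≥ 2
      rw [pvGoB]
      rw [dif_neg (by omega), dif_neg (by omega)]
      set k := (lo + (lo + n)) / 2 - lo with hk
      have hk1 : 1 ≤ k := by omega
      have hkn : k < n := by omega
      have hmid : (lo + (lo + n)) / 2 = lo + k := by omega
      rw [hmid]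
      have h2' : lo + n = (lo + k) + (n - k) := by omega
      rw [h2', ih k hkn lo (by omega), ih (n - k) (by omega) (lo + k) (by omega)]
      have : (bits.drop lo).take n = (bits.drop lo).take k ++ ((bits.drop (lo + k)).take (n - k)) := by
        rw [← List.drop_drop] -- drop k (drop lo) = drop (lo+k)? check orientation below
        rw [show n = k + (n - k) by omega, List.take_add, Nat.add_sub_cancel_left]
      rw [this]
      simp

-- ===== VERDICT (by name: the statement is the Claim_ definition above) =====
theorem count_pos_bits_spec : Claim_equal_count_pos_bits := by
  intro bits index _ _
  unfold Spec_count_pos_bits count_pos_bits count_pos_bits_alt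
  rw [count_pos_bits_foldl]
  have := pvGoB_sum bits index bits.length 0 (by omega)
  simpa using this.symm
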